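-- pv_equiv track=rewrite | github.com/Miller-Ryan-1/quadratic-voting | qv_1.py | count_of_all_possible_permutations_of
-- ===== SOURCE A (Python) =====
-- import math
--
-- def element_frequencies(strategy):
--     '''
--     Give me a base strategy (array of integers).
--
--     I return a list of the frequencies of each of the non-zero integers along with the count
--     of zeros, if any.  The returns are used to determine the number of combinations for the strategy.
--     '''
--     # Initialize data holders
--     strat_dict = {}
--     zeros = 0
--
--     # Loop through each integer in the base strategy
--     for element in strategy:
--         # if its a zero, increase zero count holder
--         if element == 0:
--             zeros += 1
--             continue
--         # If the element has already been seen, increase its count, otherwise add it to dictionary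
--         if element in strat_dict.keys():
--             strat_dict[element] += 1
--         else:
--             strat_dict[element] = 1
--
--     frequencies = list(strat_dict.values())
--
--     return frequencies, zeros
--
-- def count_of_all_possible_permutations_of(strategy, p=1):
--     '''
--     Give me a base strategy (array of integers).  Also give p=1 (default) for polar and p=0 for priority QV.
--
--     That base strategy can then be used to find polar permutations (where one or more signs
--     are flipped on positive integers in the base strategy) as well as all permutations of other numbers.
--     When summed for all base strategies of a given N and C, the total number of possible voting
--     options are given.
--
--     Thus, I return a count of all NON-NULL polar permutations.
--     '''
--     # Get the element group details
--     frequencies, zeros = element_frequencies(strategy)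
--
--     # Calculate the total permutations of the numbers of the strategy
--     # N! / (a! * b! * ... * x!...) where a,b,... are pulled from frequency list, and x is the count of zeros
--     total_perms = math.factorial(len(strategy))//(math.prod([math.factorial(x) for x in frequencies])*math.factorial(zeros))
--
--     # If polar (p=1) each number can be represented as positive or negative, so count = 2^total number of non-zeros
--     # If priority this term zeros out
--     polar_strat_count = 2**(sum(frequencies)*p)
--
--     # Multiply the two together
--     total_count_of_sets = total_perms * polar_strat_count
--
--     # Account for null strategies, if the base has any:
--     if len(set(strategy)) == 1:
--         # For polar there are two null strategies [n,n,...,n] and [-n,-n,...,-n], for priority just 1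
--         if p == 1:
--             total_count_of_sets -= 2
--         else:
--             total_count_of_sets -= 1
--
--     return total_count_of_sets
-- ===== SOURCE B (Python) =====
-- import math
--
-- def count_of_all_possible_permutations_of(strategy, p=1):
--     # Sort the strategy and scan runs of equal values -- no frequency dictionary.
--     s = sorted(strategy)
--     n = len(s)
--     denom = 1
--     zeros = 0
--     i = 0
--     while i < n:
--         j = i
--         while j < n and s[j] == s[i]:
--             j += 1
--         if s[i] == 0:
--             zeros = j - i
--         denom *= math.factorial(j - i)
--         i = j
--     total = (math.factorial(n) // denom) * 2 ** ((n - zeros) * p)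
--     if s and s[0] == s[-1]:
--         total -= 2 if p == 1 else 1
--     return total
-- ===== Notes on version B (the rewrite author's own statement) =====
-- stated objective: alternative
-- what changed: B drops the helper and the hash-table frequency tabulation: it sorts the strategy once and scans runs of equal values to get the factorial denominator and the zero count, and tests the null-strategy case by comparing the first and last element of the sorted list instead of building a set.
-- outside the precondition, e.g. on count_of_all_possible_permutations_of([1], -1): A returns -0.5, B returns -0.5
import Mathlib
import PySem

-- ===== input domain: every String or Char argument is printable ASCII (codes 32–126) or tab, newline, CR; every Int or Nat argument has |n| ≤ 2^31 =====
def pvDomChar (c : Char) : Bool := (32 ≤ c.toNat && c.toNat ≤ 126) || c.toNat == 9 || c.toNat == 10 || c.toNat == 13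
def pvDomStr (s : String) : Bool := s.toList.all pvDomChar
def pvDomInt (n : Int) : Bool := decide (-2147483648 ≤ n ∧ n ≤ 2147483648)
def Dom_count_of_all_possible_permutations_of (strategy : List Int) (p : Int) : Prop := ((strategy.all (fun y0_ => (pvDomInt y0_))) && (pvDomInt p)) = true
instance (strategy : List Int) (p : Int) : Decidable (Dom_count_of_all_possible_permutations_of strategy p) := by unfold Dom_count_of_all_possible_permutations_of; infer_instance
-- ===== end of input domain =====

-- B replaces A's hash-table frequency tabulation by sorting the strategy and scanning runs of
-- equal values (simpler: no helper dictionary pass); same return values on Pre_.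

-- ===== PORT A =====
-- math.factorial: A applies it only to nonnegative ints (a length, counts, the zero count); .toNat is exact there
def pvFact (x : Int) : Int := (Nat.factorial x.toNat : Int)

def element_frequencies (strategy : List Int) : List Int × Int :=
  let st := strategy.foldl
    (fun (s : PySem.Dict Int Int × Int) element =>
      if element = 0 then (s.1, s.2 + 1)
      else if s.1.contains element then (s.1.insert element (s.1.getD element 0 + 1), s.2)
      else (s.1.insert element 1, s.2))
    (PySem.Dict.empty, 0)
  (st.1.values, st.2)

def count_of_all_possible_permutations_of (strategy : List Int) (p : Int) : Int :=
  let fz := element_frequencies strategy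
  let frequencies := fz.1
  let zeros := fz.2
  let total_perms := PySem.Int.floordiv (pvFact (strategy.length : Int))
      ((frequencies.map (fun x => pvFact x)).prod * pvFact zeros)
  -- Python's 2**e is a float for e < 0; Pre_ excludes those inputs, .toNat is exact on the rest
  let polar_strat_count : Int := 2 ^ (frequencies.sum * p).toNat
  let total_count_of_sets := total_perms * polar_strat_count
  if (PySem.Set.ofList strategy).length = 1 then
    if p = 1 then total_count_of_sets - 2 else total_count_of_sets - 1
  else total_count_of_sets

-- ===== PORT B =====
-- the run-scanning while-loop of Source B: the indices i/j become takeWhile/dropWhile on the suffix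
def pvScan : List Int → Int → Nat → Int × Nat
  | [], denom, zeros => (denom, zeros)
  | x :: rest, denom, zeros =>
    let run := ((x :: rest).takeWhile (fun y => y == x)).length
    pvScan ((x :: rest).dropWhile (fun y => y == x))
      (denom * (Nat.factorial run : Int)) (if x == 0 then run else zeros)
termination_by l _ _ => l.length
decreasing_by
  rw [List.dropWhile_cons_of_pos (by simp)]
  exact Nat.lt_succ_of_le (List.length_dropWhile_le _ _)

-- the test 's and s[0] == s[-1]' of Source B
def pvHeadEqLast (l : List Int) : Bool :=
  match l with
  | [] => false
  | x :: r => x == (x :: r).getLast (List.cons_ne_nil x r)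

def count_of_all_possible_permutations_of_alt (strategy : List Int) (p : Int) : Int :=
  let s := PySem.List.sorted strategy (fun v => v) false
  let n := s.length
  let dz := pvScan s 1 0
  -- Python's 2**e is a float for e < 0; Pre_ excludes those inputs, .toNat is exact on the rest
  let total := PySem.Int.floordiv (Nat.factorial n : Int) dz.1 *
      2 ^ (((n : Int) - (dz.2 : Int)) * p).toNat
  if pvHeadEqLast s then (if p = 1 then total - 2 else total - 1) else total

-- ===== PRECONDITION & SPEC =====
-- Pre_ excludes inputs with p < 0 and some non-zero element: there Python's 2**(negative) makes A
-- return a float, not an int of the declared return type (B returns the same float).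
def Pre_count_of_all_possible_permutations_of (strategy : List Int) (p : Int) : Prop :=
  0 ≤ p ∨ ∀ x ∈ strategy, x = 0
instance (strategy : List Int) (p : Int) : Decidable (Pre_count_of_all_possible_permutations_of strategy p) := by unfold Pre_count_of_all_possible_permutations_of; infer_instance

def pvWitness_count_of_all_possible_permutations_of : List Int × Int := ([1, 2, 2, 0], 1)

def Spec_count_of_all_possible_permutations_of (strategy : List Int) (p : Int) (out : Int) : Prop := out = count_of_all_possible_permutations_of_alt strategy p
instance (strategy : List Int) (p : Int) (out : Int) : Decidable (Spec_count_of_all_possible_permutations_of strategy p out) := by unfold Spec_count_of_all_possible_permutations_of; infer_instance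

-- ===== CLAIM (what is proved, stated in full; the proofs are below) =====
def Claim_equal_count_of_all_possible_permutations_of : Prop := ∀ (strategy : List Int) (p : Int), Dom_count_of_all_possible_permutations_of strategy p → Pre_count_of_all_possible_permutations_of strategy p → Spec_count_of_all_possible_permutations_of strategy p (count_of_all_possible_permutations_of strategy p)

-- ===== LEMMAS AND PROOFS =====

-- the product of factorials of the per-distinct-value counts (the common denominator)
def pvP (l : List Int) : Int :=
  ((PySem.Set.ofList l).map (fun k => (Nat.factorial (List.count k l) : Int))).prod

-- A's single loop splits: the dictionary part is the counter fold over the non-zero elements,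
-- the zero part is the count of zeros.
theorem pvA_fold (strategy : List Int) (d : PySem.Dict Int Int) (z : Int) :
    strategy.foldl
      (fun (s : PySem.Dict Int Int × Int) element =>
        if element = 0 then (s.1, s.2 + 1)
        else if s.1.contains element then (s.1.insert element (s.1.getD element 0 + 1), s.2)
        else (s.1.insert element 1, s.2)) (d, z)
    = ((strategy.filter (fun x => x ≠ 0)).foldl (fun d x => d.insert x (d.getD x 0 + 1)) d,
       z + (List.count 0 strategy : Int)) := by
  induction strategy generalizing d z with
  | nil => simp
  | cons h t ih =>
    by_cases h0 : h = 0
    · subst h0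
      simp [ih]
      ring
    · have hins : (if d.contains h then (d.insert h (d.getD h 0 + 1), z)
          else (d.insert h 1, z)) = (d.insert h (d.getD h 0 + 1), z) := by
        by_cases hc : d.contains h = true
        · simp [hc]
        · have : d.getD h 0 = 0 := PySem.Dict.getD_of_not_contains d (k := h) 0 (by simpa using hc)
          simp [hc, this]
      simp [h0, hins, ih]

theorem pvSum_cast (l : List Int) (f : Int → Nat) :
    (l.map (fun a => ((f a : Nat) : Int))).sum = ((l.map f).sum : Int) := by
  induction l with
  | nil => simp
  | cons h t ih => simp [ih]

-- the distinct elements (first-occurrence order) are a permutation of Mathlib's dedup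
theorem pvOfList_perm_dedup (l : List Int) : (PySem.Set.ofList l).Perm l.dedup := by
  refine (List.perm_ext_iff_of_nodup (PySem.Set.nodup_ofList l) l.nodup_dedup).mpr ?_
  intro a
  simp [PySem.Set.mem_ofList]

-- sum of the per-distinct-value counts is the length
theorem pvSum_counts (l : List Int) :
    ((PySem.Set.ofList l).map (fun k => List.count k l)).sum = l.length := by
  have hp := (pvOfList_perm_dedup l).map (fun k => List.count k l)
  rw [hp.sum_eq]
  exact List.sum_map_count_dedup_eq_length l

-- length of the non-zero part
theorem pvLen_filter (l : List Int) :
    (l.filter (fun x => x ≠ 0)).length + List.count 0 l = l.length := by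
  induction l with
  | nil => simp
  | cons h t ih =>
    by_cases h0 : h = 0
    · subst h0; simp [← ih]; omega
    · simp [h0, ← ih]; omega

-- pvP only looks at the multiset of elements
theorem pvP_congr (l1 l2 : List Int) (hp : l1.Perm l2) : pvP l1 = pvP l2 := by
  unfold pvP
  have hf : (fun k => (Nat.factorial (List.count k l1) : Int))
      = (fun k => (Nat.factorial (List.count k l2) : Int)) := by
    funext k
    rw [hp.count_eq]
  have hsets : (PySem.Set.ofList l1).Perm (PySem.Set.ofList l2) := by
    refine (List.perm_ext_iff_of_nodup (PySem.Set.nodup_ofList l1) (PySem.Set.nodup_ofList l2)).mpr ?_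
    intro a
    rw [PySem.Set.mem_ofList, PySem.Set.mem_ofList, hp.mem_iff]
  rw [hf, (hsets.map _).prod_eq]

-- after the leading run of the minimum, everything is strictly larger
theorem pvRest_gt (x : Int) (r : List Int) (hall : ∀ z ∈ r, x ≤ z)
    (hpw : r.Pairwise (· ≤ ·)) :
    ∀ y ∈ r.dropWhile (fun y => y == x), x < y := by
  induction r with
  | nil => simp
  | cons a r' ih =>
    rcases List.pairwise_cons.mp hpw with ⟨ha, hpw'⟩
    by_cases hax : a = x
    · rw [List.dropWhile_cons_of_pos (by simp [hax])]
      exact ih (fun z hz => hall z (List.mem_cons_of_mem a hz)) hpw'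
    · rw [List.dropWhile_cons_of_neg (by simp [hax])]
      intro y hy
      have hxa : x < a := lt_of_le_of_ne (hall a (List.mem_cons_self)) (fun h => hax h.symm)
      rcases List.mem_cons.mp hy with rfl | hy'
      · exact hxa
      · exact lt_of_lt_of_le hxa (ha y hy')

-- the leading run of a sorted list is exactly the count of its head
theorem pvRun_count (x : Int) (r : List Int) (hpw : (x :: r).Pairwise (· ≤ ·)) :
    ((x :: r).takeWhile (fun y => y == x)).length = List.count x (x :: r) := by
  have hgt : ∀ y ∈ (x :: r).dropWhile (fun y => y == x), x < y := by
    rw [List.dropWhile_cons_of_pos (by simp)]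
    exact pvRest_gt x r (fun z hz => List.rel_of_pairwise_cons hpw hz)
      (List.pairwise_cons.mp hpw).2
  conv_rhs => rw [← List.takeWhile_append_dropWhile (p := fun y => y == x) (l := x :: r)]
  rw [List.count_append]
  have h1 : List.count x ((x :: r).takeWhile (fun y => y == x))
      = ((x :: r).takeWhile (fun y => y == x)).length :=
    List.count_eq_length.mpr (fun b hb => by
      have hbx := List.mem_takeWhile_imp hb
      simp only [beq_iff_eq] at hbx
      exact hbx.symm)
  have h2 : List.count x ((x :: r).dropWhile (fun y => y == x)) = 0 :=
    List.count_eq_zero.mpr (fun hx => lt_irrefl x (hgt x hx))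
  omega

-- membership in a sorted list splits into the leading run (all = head) and the rest
theorem pvMem_split (x : Int) (r : List Int) (y : Int) :
    y ∈ (x :: r) ↔ y = x ∨ y ∈ (x :: r).dropWhile (fun y => y == x) := by
  constructor
  · intro hy
    rw [← List.takeWhile_append_dropWhile (p := fun y => y == x) (l := x :: r)] at hy
    rcases List.mem_append.mp hy with hy | hy
    · refine Or.inl ?_
      have hyx := List.mem_takeWhile_imp hy
      simpa only [beq_iff_eq] using hyx
    · exact Or.inr hy
  · intro hy
    rcases hy with rfl | hy
    · exact List.mem_cons_self
    · exact (List.dropWhile_sublist _).mem hy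

-- peeling the leading run off pvP
theorem pvP_step (x : Int) (r : List Int) (hpw : (x :: r).Pairwise (· ≤ ·)) :
    pvP (x :: r) = (Nat.factorial (List.count x (x :: r)) : Int)
      * pvP ((x :: r).dropWhile (fun y => y == x)) := by
  have hgt : ∀ y ∈ (x :: r).dropWhile (fun y => y == x), x < y := by
    rw [List.dropWhile_cons_of_pos (by simp)]
    exact pvRest_gt x r (fun z hz => List.rel_of_pairwise_cons hpw hz)
      (List.pairwise_cons.mp hpw).2
  set dr := (x :: r).dropWhile (fun y => y == x) with hdr
  have hperm : (PySem.Set.ofList (x :: r)).Perm (x :: PySem.Set.ofList dr) := by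
    refine (List.perm_ext_iff_of_nodup (PySem.Set.nodup_ofList _) ?_).mpr ?_
    · exact List.nodup_cons.mpr ⟨fun hx => lt_irrefl x (hgt x ((PySem.Set.mem_ofList dr x).mp hx)),
        PySem.Set.nodup_ofList dr⟩
    · intro a
      rw [PySem.Set.mem_ofList, hdr, pvMem_split x r a]
      simp [PySem.Set.mem_ofList]
  unfold pvP
  rw [(hperm.map _).prod_eq, List.map_cons, List.prod_cons]
  congr 1
  refine congrArg List.prod (List.map_congr_left (fun k hk => ?_))
  have hkdr : k ∈ dr := (PySem.Set.mem_ofList dr k).mp hk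
  have hkx : k ≠ x := fun h => lt_irrefl x (h ▸ hgt k hkdr)
  have hc : List.count k (x :: r) = List.count k dr := by
    conv_lhs => rw [← List.takeWhile_append_dropWhile (p := fun y => y == x) (l := x :: r)]
    rw [List.count_append, ← hdr]
    have h0 : List.count k ((x :: r).takeWhile (fun y => y == x)) = 0 := by
      refine List.count_eq_zero.mpr (fun hkt => ?_)
      have hk2 := List.mem_takeWhile_imp hkt
      simp only [beq_iff_eq] at hk2
      exact hkx hk2
    omega
  rw [hc]

-- the run-scanning loop computes the denominator and the zero count, on any sorted list
theorem pvScan_spec : ∀ (n : Nat) (l : List Int), l.length ≤ n → l.Pairwise (· ≤ ·) →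
    ∀ (d : Int) (z : Nat),
    pvScan l d z = (d * pvP l, if 0 ∈ l then List.count 0 l else z) := by
  intro n
  induction n with
  | zero =>
    intro l hl _ d z
    have : l = [] := List.length_eq_zero_iff.mp (Nat.le_zero.mp hl)
    subst this
    rw [pvScan]
    simp [pvP, PySem.Set.ofList_nil]
  | succ n ih =>
    intro l hl hpw d z
    cases l with
    | nil =>
      rw [pvScan]
      simp [pvP, PySem.Set.ofList_nil]
    | cons x r =>
      rw [pvScan]
      have hdrop : (x :: r).dropWhile (fun y => y == x) = r.dropWhile (fun y => y == x) :=
        List.dropWhile_cons_of_pos (by simp)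
      have hlen : ((x :: r).dropWhile (fun y => y == x)).length ≤ n := by
        rw [hdrop]
        have := List.length_dropWhile_le (fun y => y == x) r
        simp only [List.length_cons] at hl
        omega
      have hpw' : ((x :: r).dropWhile (fun y => y == x)).Pairwise (· ≤ ·) :=
        List.Pairwise.sublist (List.dropWhile_sublist _) hpw
      have hgt : ∀ y ∈ (x :: r).dropWhile (fun y => y == x), x < y := by
        rw [hdrop]
        exact pvRest_gt x r (fun z hz => List.rel_of_pairwise_cons hpw hz)
          (List.pairwise_cons.mp hpw).2
      rw [ih _ hlen hpw']
      refine Prod.ext ?_ ?_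
      · show d * (Nat.factorial ((x :: r).takeWhile (fun y => y == x)).length : Int) * _ = _
        rw [pvRun_count x r hpw, pvP_step x r hpw]
        ring
      · show (if (0:Int) ∈ (x :: r).dropWhile (fun y => y == x) then _ else _) = _
        by_cases hx0 : x = 0
        · subst hx0
          have h0nd : (0:Int) ∉ (0 :: r).dropWhile (fun y => y == (0:Int)) :=
            fun h => lt_irrefl 0 (hgt 0 h)
          rw [if_neg h0nd]
          simp only [beq_self_eq_true, if_true]
          rw [if_pos List.mem_cons_self]
          exact pvRun_count 0 r hpw
        · have hxne : (x == (0:Int)) = false := by simp [hx0]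
          rw [hxne]
          simp only [Bool.false_eq_true, if_false]
          have hmem : (0:Int) ∈ (x :: r) ↔ (0:Int) ∈ (x :: r).dropWhile (fun y => y == x) := by
            rw [pvMem_split x r 0]
            constructor
            · rintro (h | h)
              · exact absurd h.symm hx0
              · exact h
            · exact Or.inr
          have hcount : List.count (0:Int) (x :: r)
              = List.count (0:Int) ((x :: r).dropWhile (fun y => y == x)) := by
            conv_lhs => rw [← List.takeWhile_append_dropWhile (p := fun y => y == x) (l := x :: r)]
            rw [List.count_append]
            have : List.count (0:Int) ((x :: r).takeWhile (fun y => y == x)) = 0 := by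
              refine List.count_eq_zero.mpr (fun h0t => ?_)
              have h0x := List.mem_takeWhile_imp h0t
              simp only [beq_iff_eq] at h0x
              exact hx0 h0x.symm
            omega
          by_cases h0 : (0:Int) ∈ (x :: r)
          · rw [if_pos (hmem.mp h0), if_pos h0, hcount]
          · rw [if_neg (fun hc => h0 (hmem.mpr hc)), if_neg h0]

-- A's denominator (product over distinct non-zero values, times zeros!) equals pvP
theorem pvP_split (strategy : List Int) :
    pvP strategy
      = ((PySem.Set.ofList (strategy.filter (fun x => x ≠ 0))).map
          (fun k => (Nat.factorial (List.count k (strategy.filter (fun x => x ≠ 0))) : Int))).prod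
        * (Nat.factorial (List.count 0 strategy) : Int) := by
  set xs' := strategy.filter (fun x => x ≠ 0) with hxs'
  by_cases h0 : (0:Int) ∈ strategy
  · have hperm : (PySem.Set.ofList strategy).Perm (0 :: PySem.Set.ofList xs') := by
      refine (List.perm_ext_iff_of_nodup (PySem.Set.nodup_ofList _) ?_).mpr ?_
      · refine List.nodup_cons.mpr ⟨fun hx => ?_, PySem.Set.nodup_ofList xs'⟩
        have := (PySem.Set.mem_ofList xs' 0).mp hx
        rw [hxs', List.mem_filter] at this
        simpa using this.2
      · intro a
        rw [PySem.Set.mem_ofList, List.mem_cons, PySem.Set.mem_ofList, hxs', List.mem_filter]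
        constructor
        · intro ha
          by_cases ha0 : a = 0
          · exact Or.inl ha0
          · exact Or.inr ⟨ha, by simpa using ha0⟩
        · rintro (rfl | ⟨ha, _⟩)
          · exact h0
          · exact ha
    unfold pvP
    rw [(hperm.map _).prod_eq, List.map_cons, List.prod_cons]
    rw [mul_comm]
    congr 1
    refine congrArg List.prod (List.map_congr_left (fun k hk => ?_))
    have hkx : k ≠ 0 := by
      have := (PySem.Set.mem_ofList xs' k).mp hk
      rw [hxs', List.mem_filter] at this
      simpa using this.2
    congr 1
    rw [hxs', List.count_filter (p := fun x => decide (x ≠ 0)) (by simpa using hkx)]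
  · have hc0 : List.count (0:Int) strategy = 0 := List.count_eq_zero.mpr h0
    have hfix : xs' = strategy := by
      rw [hxs']
      exact List.filter_eq_self.mpr (fun a ha => by
        simp only [decide_eq_true_eq]
        exact fun h => h0 (h ▸ ha))
    rw [hfix, hc0]
    simp [pvP]

-- every element of a (·≤·)-pairwise list is at most its last element
theorem pvLe_getLast (l : List Int) (hpw : l.Pairwise (· ≤ ·)) (h : l ≠ []) :
    ∀ y ∈ l, y ≤ l.getLast h := by
  induction l with
  | nil => simp at h
  | cons a r ih =>
    rcases List.pairwise_cons.mp hpw with ⟨ha, hpw'⟩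
    cases r with
    | nil => simp
    | cons b r' =>
      intro y hy
      rw [List.getLast_cons (List.cons_ne_nil b r')]
      rcases List.mem_cons.mp hy with rfl | hy'
      · exact le_trans (ha b List.mem_cons_self)
          (ih hpw' (List.cons_ne_nil b r') b List.mem_cons_self)
      · exact ih hpw' (List.cons_ne_nil b r') y hy'

-- a nonempty list all of whose elements are one value has singleton distinct set
theorem pvOfList_singleton (l : List Int) (a : Int) (h : l ≠ []) (ha : ∀ y ∈ l, y = a) :
    PySem.Set.ofList l = [a] := by
  induction l with
  | nil => simp at h
  | cons x t ih =>
    have hx : x = a := ha x List.mem_cons_self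
    subst hx
    rw [PySem.Set.ofList_cons]
    have hnil : (PySem.Set.ofList t).discard x = [] := by
      rw [List.eq_nil_iff_forall_not_mem]
      intro y hy
      rw [PySem.Set.mem_discard, PySem.Set.mem_ofList] at hy
      exact hy.2 (ha y (List.mem_cons_of_mem x hy.1))
    rw [hnil]

-- the two null-strategy tests agree: len(set(strategy)) == 1  ↔  sorted head = sorted last
theorem pvGuard (strategy : List Int) :
    (PySem.Set.ofList strategy).length = 1
      ↔ pvHeadEqLast (PySem.List.sorted strategy (fun v => v) false) = true := by
  have hperm := PySem.List.sorted_perm strategy (fun v => v) false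
  have hpw : (PySem.List.sorted strategy (fun v => v) false).Pairwise (· ≤ ·) :=
    PySem.List.sorted_pairwise strategy (fun v => v)
  cases hss : PySem.List.sorted strategy (fun v => v) false with
  | nil =>
    have : strategy = [] := by
      have := hperm
      rw [hss] at this
      exact this.symm.eq_nil
    subst this
    simp [pvHeadEqLast, PySem.Set.ofList]
  | cons x r =>
    rw [hss] at hperm hpw
    simp only [pvHeadEqLast, beq_iff_eq]
    constructor
    · intro hd
      rcases List.length_eq_one_iff.mp hd with ⟨a, ha⟩
      have hall : ∀ y ∈ strategy, y = a := fun y hy => by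
        have := (PySem.Set.mem_ofList strategy y).mpr hy
        rw [ha] at this
        simpa using this
      have hx : x = a := hall x (hperm.mem_iff.mp List.mem_cons_self)
      have hl : (x :: r).getLast (List.cons_ne_nil x r) = a :=
        hall _ (hperm.mem_iff.mp (List.getLast_mem _))
      rw [hl]
      exact hx
    · intro hxl
      have hallss : ∀ y ∈ (x :: r), y = x := by
        intro y hy
        have h1 : x ≤ y := by
          rcases List.mem_cons.mp hy with rfl | hy'
          · exact le_refl y
          · exact List.rel_of_pairwise_cons hpw hy'
        have h2 : y ≤ x := by
          have := pvLe_getLast (x :: r) hpw (List.cons_ne_nil x r) y hy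
          rwa [← hxl] at this
        omega
      have hne : strategy ≠ [] := by
        intro hnil
        rw [hnil] at hperm
        exact absurd hperm.eq_nil (by simp)
      have hall : ∀ y ∈ strategy, y = x := fun y hy => hallss y (hperm.mem_iff.mpr hy)
      rw [pvOfList_singleton strategy x hne hall]
      rfl

-- ===== VERDICT (by name: the statement is the Claim_ definition above) =====
theorem count_of_all_possible_permutations_of_spec : Claim_equal_count_of_all_possible_permutations_of := by
  intro strategy p _ _
  unfold Spec_count_of_all_possible_permutations_of
  unfold count_of_all_possible_permutations_of count_of_all_possible_permutations_of_alt element_frequencies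
  simp only [pvA_fold strategy PySem.Dict.empty 0,
    PySem.Dict.foldl_insert_getD_add_one_eq_counter, zero_add]
  set xs' := strategy.filter (fun x => x ≠ 0) with hxs'
  -- A's frequencies list
  have hfreq : (PySem.Dict.counter xs').values
      = (PySem.Set.ofList xs').map (fun k => ((List.count k xs' : Nat) : Int)) := by
    show (PySem.Dict.counter xs').items.map (·.2) = _
    rw [PySem.Dict.items_counter, List.map_map]
    rfl
  -- A's denominator is pvP strategy
  have hdenomA : ((PySem.Dict.counter xs').values.map (fun x => pvFact x)).prod
        * pvFact (List.count 0 strategy : Int) = pvP strategy := by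
    rw [hfreq, List.map_map, pvP_split strategy, ← hxs']
    simp only [pvFact, Int.toNat_natCast, Function.comp_def]
  -- A's exponent is B's exponent
  have hsum : ((PySem.Dict.counter xs').values.sum * p)
      = ((strategy.length : Int) - (List.count 0 strategy : Int)) * p := by
    rw [hfreq, pvSum_cast, pvSum_counts]
    have := pvLen_filter strategy
    rw [← hxs'] at this
    congr 1
    omega
  -- B's scan computes pvP of the sorted list = pvP strategy, and the zero count
  have hperms := PySem.List.sorted_perm strategy (fun v => v) false
  have hscan : pvScan (PySem.List.sorted strategy (fun v => v) false) 1 0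
      = (pvP strategy, List.count 0 strategy) := by
    rw [pvScan_spec (PySem.List.sorted strategy (fun v => v) false).length _ le_rfl
      (PySem.List.sorted_pairwise strategy (fun v => v)) 1 0]
    rw [one_mul, pvP_congr _ _ hperms]
    congr 1
    by_cases h0 : (0:Int) ∈ PySem.List.sorted strategy (fun v => v) false
    · rw [if_pos h0, hperms.count_eq]
    · rw [if_neg h0]
      have : (0:Int) ∉ strategy := fun hc => h0 (hperms.mem_iff.mpr hc)
      rw [List.count_eq_zero.mpr this]
  rw [hdenomA, hsum, hscan]
  have hlen : (PySem.List.sorted strategy (fun v => v) false).length = strategy.length :=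
    hperms.length_eq
  rw [hlen]
  have hfactn : pvFact (strategy.length : Int) = (Nat.factorial strategy.length : Int) := by
    simp [pvFact]
  rw [hfactn]
  -- the two null-strategy guards agree
  by_cases hg : (PySem.Set.ofList strategy).length = 1
  · rw [if_pos hg, if_pos ((pvGuard strategy).mp hg)]
  · rw [if_neg hg, if_neg (fun hc => hg ((pvGuard strategy).mpr hc))]
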